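-- pv_equiv track=rewrite | github.com/grapheneaffiliate/h4-polytopic-attention | solve_arc_b18.py | solve_b6afb2da
-- ===== SOURCE A (Python) =====
-- def solve_b6afb2da(grid):
--     """Each rectangle of 5s: corners->1, border non-corners->4, interior->2."""
--     rows = len(grid)
--     cols = len(grid[0])
--     out = [row[:] for row in grid]
--
--     visited = [[False]*cols for _ in range(rows)]
--
--     def flood_fill(r, c):
--         stack = [(r, c)]
--         cells = []
--         while stack:
--             cr, cc = stack.pop()
--             if cr < 0 or cr >= rows or cc < 0 or cc >= cols:
--                 continue
--             if visited[cr][cc] or grid[cr][cc] != 5: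
--                 continue
--             visited[cr][cc] = True
--             cells.append((cr, cc))
--             for dr, dc in [(-1,0),(1,0),(0,-1),(0,1)]:
--                 stack.append((cr+dr, cc+dc))
--         return cells
--
--     for r in range(rows):
--         for c in range(cols):
--             if grid[r][c] == 5 and not visited[r][c]:
--                 cells = flood_fill(r, c)
--                 min_r2 = min(r for r, c in cells)
--                 max_r2 = max(r for r, c in cells)
--                 min_c2 = min(c for r, c in cells)
--                 max_c2 = max(c for r, c in cells)
--
--                 for cr, cc in cells:
--                     is_top = (cr == min_r2)
--                     is_bot = (cr == max_r2)
--                     is_left = (cc == min_c2)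
--                     is_right = (cc == max_c2)
--
--                     is_corner = (is_top or is_bot) and (is_left or is_right)
--                     is_border = is_top or is_bot or is_left or is_right
--
--                     if is_corner:
--                         out[cr][cc] = 1
--                     elif is_border:
--                         out[cr][cc] = 4
--                     else:
--                         out[cr][cc] = 2
--
--     return out
-- ===== SOURCE B (Python) =====
-- def solve_b6afb2da(grid):
--     """Recolor each 4-connected region of 5s by its bounding box: corners->1, border->4, interior->2.
--     Alternative strategy: per-cell monotone closure (fixed-point neighbourhood saturation) with a
--     bounding-box memo dict, building the output grid row by row instead of mutating a copy."""
--     rows = len(grid)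
--     cols = len(grid[0])
--
--     def component(p):
--         s = {p}
--         while True:
--             grown = set(s)
--             for (r, c) in s:
--                 for (nr, nc) in ((r - 1, c), (r + 1, c), (r, c - 1), (r, c + 1)):
--                     if 0 <= nr < rows and 0 <= nc < cols and grid[nr][nc] == 5:
--                         grown.add((nr, nc))
--             if len(grown) == len(s):
--                 return s
--             s = grown
--
--     bbox = {}
--     res = []
--     for r in range(rows):
--         row = list(grid[r])
--         for c in range(cols):
--             if grid[r][c] == 5:
--                 if (r, c) not in bbox:
--                     cells = component((r, c))
--                     b = (min(x for x, _ in cells), max(x for x, _ in cells),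
--                          min(y for _, y in cells), max(y for _, y in cells))
--                     for q in cells:
--                         bbox[q] = b
--                 mnr, mxr, mnc, mxc = bbox[(r, c)]
--                 if (r == mnr or r == mxr) and (c == mnc or c == mxc):
--                     row[c] = 1
--                 elif r == mnr or r == mxr or c == mnc or c == mxc:
--                     row[c] = 4
--                 else:
--                     row[c] = 2
--         res.append(row)
--     return res
-- ===== Notes on version B (the rewrite author's own statement) =====
-- stated objective: alternative
-- what changed: Replaces the shared-visited stack flood fill with in-place recoloring of a copied grid by a per-cell monotone fixed-point saturation of the 5-neighbourhood (grow a set until it stops growing), a bounding-box memo dict keyed by cell so each region is saturated once, and a freshly built output grid row by row.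
import Mathlib
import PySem

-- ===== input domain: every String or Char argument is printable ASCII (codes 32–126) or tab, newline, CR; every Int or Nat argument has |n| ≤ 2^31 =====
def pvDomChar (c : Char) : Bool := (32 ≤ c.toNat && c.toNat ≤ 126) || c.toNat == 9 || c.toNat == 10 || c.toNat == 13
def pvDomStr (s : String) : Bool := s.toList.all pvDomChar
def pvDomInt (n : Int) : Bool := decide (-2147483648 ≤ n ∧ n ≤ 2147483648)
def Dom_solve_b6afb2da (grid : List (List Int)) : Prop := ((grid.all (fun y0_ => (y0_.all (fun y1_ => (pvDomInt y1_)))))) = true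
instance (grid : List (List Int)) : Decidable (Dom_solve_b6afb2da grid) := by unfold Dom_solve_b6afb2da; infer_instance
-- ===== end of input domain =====

-- B recolors the same regions of 5s but by a different decomposition: per-cell monotone
-- fixed-point saturation of the neighbourhood (no stack/visited flood fill), a bounding-box
-- memo dict, and a freshly built output grid instead of in-place recoloring of a copy
-- (objective: alternative; not claimed faster).

-- shared cell accessors (both Pythons read len(grid), len(grid[0]) and grid[r][c] the same way)
def pvR (g : List (List Int)) : Int := g.length
def pvC (g : List (List Int)) : Int := (g.headD []).length
def pvCell (g : List (List Int)) (p : Int × Int) : Int := (g.getD p.1.toNat []).getD p.2.toNat 0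
-- `0 <= r < rows and 0 <= c < cols and grid[r][c] == 5` (B's guard; also the semantic "live cell")
def pvOk (g : List (List Int)) (p : Int × Int) : Bool :=
  decide (0 ≤ p.1) && decide (p.1 < pvR g) && decide (0 ≤ p.2) && decide (p.2 < pvC g) &&
    decide (pvCell g p = 5)
-- the finite set of live cells (termination measures only)
def pvU (g : List (List Int)) : Finset (Int × Int) :=
  ((Finset.range g.length ×ˢ Finset.range (g.headD []).length).image
    (fun rc => ((rc.1 : Int), (rc.2 : Int)))).filter (fun p => pvCell g p = 5)
-- min/max of the generators `(r for r, c in cells)` / `(c for r, c in cells)` (both Pythons)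
def bboxOf (cells : List (Int × Int)) : Int × Int × Int × Int :=
  ((PySem.List.min? (cells.map Prod.fst) (fun x => x)).getD 0,
   (PySem.List.max? (cells.map Prod.fst) (fun x => x)).getD 0,
   (PySem.List.min? (cells.map Prod.snd) (fun x => x)).getD 0,
   (PySem.List.max? (cells.map Prod.snd) (fun x => x)).getD 0)
-- the corner/border/interior conditional (identical in both Pythons)
def colorOf (p : Int × Int) (b : Int × Int × Int × Int) : Int :=
  if (p.1 = b.1 ∨ p.1 = b.2.1) ∧ (p.2 = b.2.2.1 ∨ p.2 = b.2.2.2) then 1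
  else if p.1 = b.1 ∨ p.1 = b.2.1 ∨ p.2 = b.2.2.1 ∨ p.2 = b.2.2.2 then 4
  else 2

-- ===== PORT A =====
-- push order (-1,0),(1,0),(0,-1),(0,1) onto a LIFO stack; head of the list is the top
def nbrsPush (p : Int × Int) : List (Int × Int) :=
  [(p.1, p.2 + 1), (p.1, p.2 - 1), (p.1 + 1, p.2), (p.1 - 1, p.2)]

def floodAux (g : List (List Int)) (visited : Finset (Int × Int))
    (stack cells : List (Int × Int)) : List (Int × Int) × Finset (Int × Int) :=
  match stack with
  | [] => (cells, visited)
  | q :: rest =>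
    if q.1 < 0 ∨ pvR g ≤ q.1 ∨ q.2 < 0 ∨ pvC g ≤ q.2 then
      floodAux g visited rest cells
    else if q ∈ visited ∨ pvCell g q ≠ 5 then
      floodAux g visited rest cells
    else
      floodAux g (insert q visited) (nbrsPush q ++ rest) (cells ++ [q])
termination_by ((pvU g \ visited).card, stack.length)
decreasing_by
  · exact Prod.Lex.right _ (by simp)
  · exact Prod.Lex.right _ (by simp)
  · apply Prod.Lex.left
    apply Finset.card_lt_card
    have hqU : q ∈ pvU g := by
      simp only [pvU, Finset.mem_filter, Finset.mem_image, Finset.mem_product, Finset.mem_range]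
      refine ⟨⟨(q.1.toNat, q.2.toNat), ⟨?_, ?_⟩, ?_⟩, by tauto⟩
      · simp only [pvR] at *; omega
      · simp only [pvC, pvR] at *; omega
      · have : (0:Int) ≤ q.1 ∧ (0:Int) ≤ q.2 := by omega
        simp [Int.toNat_of_nonneg this.1, Int.toNat_of_nonneg this.2]
    constructor
    · intro x hx
      simp only [Finset.mem_sdiff, Finset.mem_insert] at *
      tauto
    · intro hsub
      have := hsub (by simp only [Finset.mem_sdiff]; exact ⟨hqU, by tauto⟩)
      simp at this

-- scan order of `for r in range(rows): for c in range(cols):`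
def scanPos (g : List (List Int)) : List (Int × Int) :=
  (List.range g.length).flatMap
    (fun (r : Nat) => (List.range (g.headD []).length).map
      (fun (c : Nat) => ((r : Int), (c : Int))))

-- out[cr][cc] = v
def setCell (m : List (List Int)) (p : Int × Int) (v : Int) : List (List Int) :=
  m.set p.1.toNat ((m.getD p.1.toNat []).set p.2.toNat v)

def stepA (g : List (List Int)) (st : Finset (Int × Int) × List (List Int))
    (p : Int × Int) : Finset (Int × Int) × List (List Int) :=
  if pvCell g p = 5 ∧ p ∉ st.1 then
    let fr := floodAux g st.1 [p] []
    let b := bboxOf fr.1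
    (fr.2, fr.1.foldl (fun o q => setCell o q (colorOf q b)) st.2)
  else st

def solve_b6afb2da (grid : List (List Int)) : List (List Int) :=
  ((scanPos grid).foldl (stepA grid) (∅, grid.map (fun row => row))).2

-- ===== PORT B =====
def nbrs4 (p : Int × Int) : List (Int × Int) :=
  [(p.1 - 1, p.2), (p.1 + 1, p.2), (p.1, p.2 - 1), (p.1, p.2 + 1)]

-- `grown = set(s); for cell in s: for nbr ...: grown.add(nbr)`
def growB (g : List (List Int)) (s : PySem.Set (Int × Int)) : PySem.Set (Int × Int) :=
  s.foldl (fun acc p => ((nbrs4 p).filter (pvOk g)).foldl PySem.Set.add acc) s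

-- facts the while-loop's termination argument needs (cited in decreasing_by)
theorem pv_foldl_add_shape {α : Type} [BEq α] [LawfulBEq α] (l : List α) (t : PySem.Set α) :
    ∃ e, l.foldl PySem.Set.add t = t ++ e ∧ ∀ x ∈ e, x ∈ l ∧ x ∉ t := by
  induction l generalizing t with
  | nil => exact ⟨[], by simp⟩
  | cons a l ih =>
    by_cases ha : a ∈ t
    · obtain ⟨e, he, hmem⟩ := ih t
      refine ⟨e, by simpa [PySem.Set.add, PySem.Set.contains, ha] using he,
        fun x hx => ⟨by simp [(hmem x hx).1], (hmem x hx).2⟩⟩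
    · obtain ⟨e, he, hmem⟩ := ih (t ++ [a])
      refine ⟨a :: e, by simpa [PySem.Set.add, PySem.Set.contains, ha] using he, ?_⟩
      intro x hx
      rcases List.mem_cons.1 hx with rfl | hx
      · exact ⟨by simp, ha⟩
      · have := hmem x hx
        simp only [List.mem_append, List.mem_singleton] at this
        refine ⟨by simp [this.1], fun hxt => this.2 (Or.inl hxt)⟩

theorem pv_growB_gen (g : List (List Int)) (l : List (Int × Int)) (t : PySem.Set (Int × Int)) :
    ∃ e, l.foldl (fun acc p => ((nbrs4 p).filter (pvOk g)).foldl PySem.Set.add acc) t = t ++ e ∧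
      ∀ x ∈ e, pvOk g x = true ∧ x ∉ t := by
  induction l generalizing t with
  | nil => exact ⟨[], by simp⟩
  | cons a l ih =>
    obtain ⟨e1, he1, hm1⟩ := pv_foldl_add_shape ((nbrs4 a).filter (pvOk g)) t
    obtain ⟨e2, he2, hm2⟩ := ih (t ++ e1)
    refine ⟨e1 ++ e2, ?_, ?_⟩
    · simp only [List.foldl_cons, he1, he2, List.append_assoc]
    · intro x hx
      rcases List.mem_append.1 hx with hx | hx
      · exact ⟨(List.mem_filter.1 (hm1 x hx).1).2, (hm1 x hx).2⟩
      · exact ⟨(hm2 x hx).1, fun hxt => (hm2 x hx).2 (List.mem_append_left e1 hxt)⟩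

theorem pv_growB_shape (g : List (List Int)) (s : PySem.Set (Int × Int)) :
    ∃ e, growB g s = s ++ e ∧ ∀ x ∈ e, pvOk g x = true ∧ x ∉ s := by
  obtain ⟨e, he, hm⟩ := pv_growB_gen g s s
  exact ⟨e, he, fun x hx => ⟨(hm x hx).1, (hm x hx).2⟩⟩

theorem pv_mem_pvU (g : List (List Int)) (p : Int × Int) :
    p ∈ pvU g ↔ pvOk g p = true := by
  simp only [pvU, Finset.mem_filter, Finset.mem_image, Finset.mem_product, Finset.mem_range,
    pvOk, pvR, pvC, Bool.and_eq_true, decide_eq_true_eq, Prod.exists, List.headD_eq_head?_getD]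
  constructor
  · rintro ⟨⟨a, b, ⟨ha, hb⟩, rfl⟩, h5⟩
    refine ⟨⟨⟨⟨by simp, by simp; omega⟩, by simp⟩, by simp; omega⟩, h5⟩
  · rintro ⟨⟨⟨⟨h1, h2⟩, h3⟩, h4⟩, h5⟩
    refine ⟨⟨p.1.toNat, p.2.toNat, ⟨by omega, by omega⟩, ?_⟩, h5⟩
    simp [Int.toNat_of_nonneg h1, Int.toNat_of_nonneg h3]

theorem pv_growB_mono_card (g : List (List Int)) (s : PySem.Set (Int × Int))
    (h : ¬ (growB g s).length = s.length) :
    (pvU g ∪ (growB g s).toFinset).card - (growB g s).toFinset.card <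
      (pvU g ∪ s.toFinset).card - s.toFinset.card := by
  obtain ⟨e, he, hm⟩ := pv_growB_shape g s
  have hne : e ≠ [] := by rintro rfl; rw [List.append_nil] at he; exact h (by rw [he])
  obtain ⟨y, hy⟩ := List.exists_mem_of_ne_nil e hne
  have hgf : (growB g s).toFinset = s.toFinset ∪ e.toFinset := by
    rw [he, List.toFinset_append]
  have heU : e.toFinset ⊆ pvU g := by
    intro x hx
    exact (pv_mem_pvU g x).2 (hm x (List.mem_toFinset.1 hx)).1
  have hU : pvU g ∪ (growB g s).toFinset = pvU g ∪ s.toFinset := by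
    rw [hgf]
    rw [Finset.union_comm s.toFinset e.toFinset, ← Finset.union_assoc]
    rw [Finset.union_eq_left.2 heU]
  have hss : s.toFinset ⊂ (growB g s).toFinset := by
    rw [hgf]
    constructor
    · exact Finset.subset_union_left
    · intro hsub
      have := hsub (Finset.mem_union_right _ (List.mem_toFinset.2 hy))
      exact (hm y hy).2 (List.mem_toFinset.1 this)
  have h1 : s.toFinset.card < (growB g s).toFinset.card := Finset.card_lt_card hss
  have h2 : (growB g s).toFinset.card ≤ (pvU g ∪ s.toFinset).card := by
    rw [← hU]
    exact Finset.card_le_card Finset.subset_union_right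
  rw [hU]
  omega

def componentB (g : List (List Int)) (s : PySem.Set (Int × Int)) : PySem.Set (Int × Int) :=
  let grown := growB g s
  if grown.length = s.length then s else componentB g grown
termination_by ((pvU g ∪ s.toFinset).card - s.toFinset.card)
decreasing_by exact pv_growB_mono_card g s (by assumption)

def stepBc (g : List (List Int)) (r : Int)
    (st : PySem.Dict (Int × Int) (Int × Int × Int × Int) × List Int) (c : Int) :
    PySem.Dict (Int × Int) (Int × Int × Int × Int) × List Int :=
  let p := (r, c)
  if pvCell g p = 5 then
    let d :=
      if (st.1.get? p).isNone then
        let cells := componentB g (PySem.Set.ofList [p])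
        let b := bboxOf cells
        cells.foldl (fun d q => d.insert q b) st.1
      else st.1
    (d, st.2.set c.toNat (colorOf p ((d.get? p).getD (0, 0, 0, 0))))
  else st

def stepBr (g : List (List Int))
    (st : PySem.Dict (Int × Int) (Int × Int × Int × Int) × List (List Int)) (r : Int) :
    PySem.Dict (Int × Int) (Int × Int × Int × Int) × List (List Int) :=
  let inner := ((List.range (g.headD []).length).map (fun (c : Nat) => (c : Int))).foldl
    (stepBc g r) (st.1, g.getD r.toNat [])
  (inner.1, st.2 ++ [inner.2])

def solve_b6afb2da_alt (grid : List (List Int)) : List (List Int) :=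
  (((List.range grid.length).map (fun (r : Nat) => (r : Int))).foldl (stepBr grid) (PySem.Dict.empty, [])).2

-- ===== PRECONDITION & SPEC =====
-- Pre_ excludes exactly the inputs where Python A raises IndexError (and B raises there too):
-- the empty grid (len(grid[0])) and grids with a row shorter than row 0.
def Pre_solve_b6afb2da (grid : List (List Int)) : Prop :=
  grid ≠ [] ∧ ∀ row ∈ grid, (grid.headD []).length ≤ row.length
instance (grid : List (List Int)) : Decidable (Pre_solve_b6afb2da grid) := by
  unfold Pre_solve_b6afb2da; infer_instance
def pvWitness_solve_b6afb2da : List (List Int) := [[5, 5, 0], [5, 5, 5], [0, 5, 3]]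

def Spec_solve_b6afb2da (grid : List (List Int)) (out : List (List Int)) : Prop :=
  out = solve_b6afb2da_alt grid
instance (grid : List (List Int)) (out : List (List Int)) :
    Decidable (Spec_solve_b6afb2da grid out) := by unfold Spec_solve_b6afb2da; infer_instance

-- ===== CLAIM (what is proved, stated in full; the proofs are below) =====
def Claim_equal_solve_b6afb2da : Prop :=
  ∀ (grid : List (List Int)), Dom_solve_b6afb2da grid → Pre_solve_b6afb2da grid →
    Spec_solve_b6afb2da grid (solve_b6afb2da grid)

-- ===== LEMMAS AND PROOFS =====

theorem pvOk_iff (g : List (List Int)) (q : Int × Int) :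
    pvOk g q = true ↔ (0 ≤ q.1 ∧ q.1 < pvR g ∧ 0 ≤ q.2 ∧ q.2 < pvC g ∧ pvCell g q = 5) := by
  simp [pvOk, and_assoc]

theorem pv_mem_nbrsPush (p q : Int × Int) : q ∈ nbrsPush p ↔ q ∈ nbrs4 p := by
  simp [nbrsPush, nbrs4]; tauto

theorem pv_nbrs4_symm (p q : Int × Int) : q ∈ nbrs4 p ↔ p ∈ nbrs4 q := by
  obtain ⟨a, b⟩ := p
  obtain ⟨c, d⟩ := q
  simp only [nbrs4, List.mem_cons, List.not_mem_nil, or_false, Prod.mk.injEq]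
  constructor <;> (rintro (⟨h1, h2⟩ | ⟨h1, h2⟩ | ⟨h1, h2⟩ | ⟨h1, h2⟩) <;> omega)

def EE (g : List (List Int)) (p q : Int × Int) : Prop :=
  pvOk g p = true ∧ pvOk g q = true ∧ q ∈ nbrs4 p

def Conn (g : List (List Int)) (p q : Int × Int) : Prop := Relation.ReflTransGen (EE g) p q

theorem EE_symm {g : List (List Int)} {p q : Int × Int} (h : EE g p q) : EE g q p :=
  ⟨h.2.1, h.1, (pv_nbrs4_symm q p).2 h.2.2⟩

theorem Conn_symm {g : List (List Int)} {p q : Int × Int} (h : Conn g p q) : Conn g q p :=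
  (Relation.ReflTransGen.symmetric (fun _ _ hh => EE_symm hh)) h

theorem Conn_ok {g : List (List Int)} {p q : Int × Int} (h : Conn g p q)
    (hp : pvOk g p = true) : pvOk g q = true := by
  induction h with
  | refl => exact hp
  | tail _ e _ => exact e.2.1

theorem Conn_class {g : List (List Int)} {p q : Int × Int} (h : Conn g p q) (x : Int × Int) :
    Conn g p x ↔ Conn g q x :=
  ⟨fun hx => Relation.ReflTransGen.trans (Conn_symm h) hx,
   fun hx => Relation.ReflTransGen.trans h hx⟩

inductive Rch (g : List (List Int)) (V : Finset (Int × Int)) :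
    List (Int × Int) → (Int × Int) → Prop
  | base {S : List (Int × Int)} {p : Int × Int} :
      p ∈ S → pvOk g p = true → p ∉ V → Rch g V S p
  | step {S : List (Int × Int)} {p q : Int × Int} :
      Rch g V S p → q ∈ nbrsPush p → pvOk g q = true → q ∉ V → Rch g V S q

theorem Rch_ok {g : List (List Int)} {V : Finset (Int × Int)} {S : List (Int × Int)}
    {x : Int × Int} (h : Rch g V S x) : pvOk g x = true ∧ x ∉ V := by
  cases h with
  | base _ hok hv => exact ⟨hok, hv⟩
  | step _ _ hok hv => exact ⟨hok, hv⟩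

theorem Rch_mono {g : List (List Int)} {V : Finset (Int × Int)} {S S' : List (Int × Int)}
    {x : Int × Int} (hs : ∀ y ∈ S, y ∈ S') (h : Rch g V S x) : Rch g V S' x := by
  induction h with
  | base hp hok hv => exact Rch.base (hs _ hp) hok hv
  | step _ hn hok hv ih => exact Rch.step ih hn hok hv

theorem Rch_skip {g : List (List Int)} {V : Finset (Int × Int)} {q : Int × Int}
    {rest : List (Int × Int)} (h : q ∈ V ∨ pvOk g q = false) (x : Int × Int) :
    Rch g V (q :: rest) x ↔ Rch g V rest x := by
  constructor
  · intro hx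
    induction hx with
    | base hp hok hv =>
      rcases List.mem_cons.1 hp with rfl | hp
      · rcases h with h | h
        · exact absurd h hv
        · rw [hok] at h; cases h
      · exact Rch.base hp hok hv
    | step _ hn hok hv ih => exact Rch.step ih hn hok hv
  · exact Rch_mono (fun y hy => List.mem_cons_of_mem q hy)

theorem Rch_visit {g : List (List Int)} {V : Finset (Int × Int)} {q : Int × Int}
    {rest : List (Int × Int)} (hok : pvOk g q = true) (hv : q ∉ V) (x : Int × Int) :
    Rch g V (q :: rest) x ↔ (x = q ∨ Rch g (insert q V) (nbrsPush q ++ rest) x) := by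
  constructor
  · intro hx
    induction hx with
    | @base p hp hok' hv' =>
      rcases List.mem_cons.1 hp with rfl | hp
      · exact Or.inl rfl
      · by_cases hq : p = q
        · exact Or.inl hq
        · exact Or.inr (Rch.base (List.mem_append_right _ hp) hok'
            (by simp [Finset.mem_insert, hq, hv']))
    | @step p x' hr hn hok' hv' ih =>
      by_cases hxq : x' = q
      · exact Or.inl hxq
      · rcases ih with rfl | ih
        · exact Or.inr (Rch.base (List.mem_append_left _ hn) hok'
            (by simp [Finset.mem_insert, hxq, hv']))
        · exact Or.inr (Rch.step ih hn hok' (by simp [Finset.mem_insert, hxq, hv']))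
  · rintro (rfl | hx)
    · exact Rch.base (List.mem_cons_self) hok hv
    · induction hx with
      | @base p hp hok' hv' =>
        rcases List.mem_append.1 hp with hp | hp
        · exact Rch.step (Rch.base List.mem_cons_self hok hv) hp hok'
            (fun hh => hv' (Finset.mem_insert_of_mem hh))
        · exact Rch.base (List.mem_cons_of_mem q hp) hok'
            (fun hh => hv' (Finset.mem_insert_of_mem hh))
      | @step p x' hr hn hok' hv' ih =>
        exact Rch.step ih hn hok' (fun hh => hv' (Finset.mem_insert_of_mem hh))

theorem flood_spec (g : List (List Int)) (V : Finset (Int × Int))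
    (S C : List (Int × Int)) :
    (∃ l, (floodAux g V S C).1 = C ++ l ∧ l.Nodup ∧ (∀ x, x ∈ l ↔ Rch g V S x)) ∧
    (∀ x, x ∈ (floodAux g V S C).2 ↔ x ∈ V ∨ Rch g V S x) := by
  induction V, S, C using floodAux.induct g with
  | case1 V C =>
    rw [floodAux]
    have hno : ∀ x, ¬ Rch g V ([] : List (Int × Int)) x := by
      intro x hx
      induction hx with
      | base hp _ _ => simp at hp
      | step _ _ _ _ ih => exact ih
    exact ⟨⟨[], by simp, by simp, fun x => by simp [hno x]⟩, fun x => by simp [hno x]⟩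
  | case2 V C q rest hoob ih =>
    rw [floodAux, if_pos hoob]
    have hq : q ∈ V ∨ pvOk g q = false := by
      right
      rw [Bool.eq_false_iff]
      intro ht
      rw [pvOk_iff] at ht
      omega
    obtain ⟨⟨l, h1, h2, h3⟩, h4⟩ := ih
    exact ⟨⟨l, h1, h2, fun x => (h3 x).trans (Rch_skip hq x).symm⟩,
      fun x => (h4 x).trans (by rw [Rch_skip hq x])⟩
  | case3 V C q rest hoob hsk ih =>
    rw [floodAux, if_neg hoob, if_pos hsk]
    have hq : q ∈ V ∨ pvOk g q = false := by
      rcases hsk with h | h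
      · exact Or.inl h
      · right; simp [pvOk, h]
    obtain ⟨⟨l, h1, h2, h3⟩, h4⟩ := ih
    exact ⟨⟨l, h1, h2, fun x => (h3 x).trans (Rch_skip hq x).symm⟩,
      fun x => (h4 x).trans (by rw [Rch_skip hq x])⟩
  | case4 V C q rest hoob hsk ih =>
    rw [floodAux, if_neg hoob, if_neg hsk]
    have hok : pvOk g q = true := by
      rw [pvOk_iff]
      have h5 : pvCell g q = 5 := by
        by_contra hc
        exact hsk (Or.inr hc)
      exact ⟨by omega, by omega, by omega, by omega, h5⟩
    have hv : q ∉ V := fun hc => hsk (Or.inl hc)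
    obtain ⟨⟨l, h1, h2, h3⟩, h4⟩ := ih
    have hql : q ∉ l := by
      intro hql
      have := ((h3 q).1 hql)
      exact (Rch_ok this).2 (Finset.mem_insert_self q V)
    refine ⟨⟨q :: l, by simpa using h1, List.nodup_cons.2 ⟨hql, h2⟩, fun x => ?_⟩, fun x => ?_⟩
    · rw [Rch_visit hok hv x, List.mem_cons, h3 x]
    · rw [h4 x, Rch_visit hok hv x, Finset.mem_insert]
      constructor
      · rintro ((rfl | h) | h)
        · exact Or.inr (Or.inl rfl)
        · exact Or.inl h
        · exact Or.inr (Or.inr h)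
      · rintro (h | rfl | h)
        · exact Or.inl (Or.inr h)
        · exact Or.inl (Or.inl rfl)
        · exact Or.inr h


def ClosedV (g : List (List Int)) (V : Finset (Int × Int)) : Prop :=
  ∀ p ∈ V, pvOk g p = true ∧ ∀ q, EE g p q → q ∈ V

theorem Closed_conn {g : List (List Int)} {V : Finset (Int × Int)} (hV : ClosedV g V)
    {p x : Int × Int} (hp : p ∈ V) (h : Conn g p x) : x ∈ V := by
  induction h with
  | refl => exact hp
  | tail _ e ih => exact (hV _ ih).2 _ e

theorem Rch_single_iff_Conn {g : List (List Int)} {V : Finset (Int × Int)} {p : Int × Int}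
    (hV : ClosedV g V) (hok : pvOk g p = true) (hp : p ∉ V) (x : Int × Int) :
    Rch g V [p] x ↔ Conn g p x := by
  constructor
  · intro h
    induction h with
    | @base y hy hok' hv' =>
      have : y = p := by simpa using hy
      subst this
      exact Relation.ReflTransGen.refl
    | @step y x' hr hn hok' hv' ih =>
      exact Relation.ReflTransGen.tail ih ⟨(Rch_ok hr).1, hok', (pv_mem_nbrsPush _ _).1 hn⟩
  · intro h
    induction h with
    | refl => exact Rch.base (by simp) hok hp
    | @tail b c hab e ih =>
      refine Rch.step ih ((pv_mem_nbrsPush _ _).2 e.2.2) e.2.1 (fun hv => ?_)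
      exact hp (Closed_conn hV hv (Conn_symm (hab.tail e)))

theorem pv_mem_foldl_add {α : Type} [BEq α] [LawfulBEq α] (l : List α) (t : PySem.Set α)
    (x : α) : x ∈ l.foldl PySem.Set.add t ↔ x ∈ t ∨ x ∈ l := by
  induction l generalizing t with
  | nil => simp
  | cons a l ih =>
    rw [List.foldl_cons, ih, PySem.Set.mem_add, List.mem_cons]
    tauto

theorem pv_mem_growB_gen (g : List (List Int)) (l : List (Int × Int))
    (t : PySem.Set (Int × Int)) (x : Int × Int) :
    x ∈ l.foldl (fun acc p => ((nbrs4 p).filter (pvOk g)).foldl PySem.Set.add acc) t ↔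
      x ∈ t ∨ ∃ q ∈ l, x ∈ nbrs4 q ∧ pvOk g x = true := by
  induction l generalizing t with
  | nil => simp
  | cons a l ih =>
    rw [List.foldl_cons, ih, pv_mem_foldl_add]
    simp only [List.mem_filter, List.mem_cons]
    constructor
    · rintro ((h | h) | ⟨q, hq, hn, hok⟩)
      · exact Or.inl h
      · exact Or.inr ⟨a, Or.inl rfl, h.1, h.2⟩
      · exact Or.inr ⟨q, Or.inr hq, hn, hok⟩
    · rintro (h | ⟨q, rfl | hq, hn, hok⟩)
      · exact Or.inl (Or.inl h)
      · exact Or.inl (Or.inr ⟨hn, hok⟩)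
      · exact Or.inr ⟨q, hq, hn, hok⟩

theorem pv_mem_growB (g : List (List Int)) (s : PySem.Set (Int × Int)) (x : Int × Int) :
    x ∈ growB g s ↔ x ∈ s ∨ ∃ q ∈ s, x ∈ nbrs4 q ∧ pvOk g x = true := by
  unfold growB
  exact pv_mem_growB_gen g s s x

theorem componentB_inv (g : List (List Int)) (p : Int × Int) :
    ∀ s : PySem.Set (Int × Int), (∀ x ∈ s, pvOk g x = true ∧ Conn g p x) →
      ∀ x ∈ componentB g s, pvOk g x = true ∧ Conn g p x := by
  intro s
  induction s using componentB.induct g with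
  | case1 s grown h =>
    intro hinv x hx
    rw [componentB, if_pos h] at hx
    exact hinv x hx
  | case2 s grown h ih =>
    intro hinv
    rw [componentB, if_neg h]
    refine ih (fun x hx => ?_)
    rcases (pv_mem_growB g s x).1 hx with hx | ⟨q, hq, hn, hok⟩
    · exact hinv x hx
    · exact ⟨hok, Relation.ReflTransGen.tail (hinv q hq).2 ⟨(hinv q hq).1, hok, hn⟩⟩

theorem componentB_supset (g : List (List Int)) :
    ∀ s : PySem.Set (Int × Int), ∀ x ∈ s, x ∈ componentB g s := by
  intro s
  induction s using componentB.induct g with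
  | case1 s grown h =>
    intro x hx
    rw [componentB, if_pos h]
    exact hx
  | case2 s grown h ih =>
    intro x hx
    rw [componentB, if_neg h]
    exact ih x ((pv_mem_growB g s x).2 (Or.inl hx))

theorem componentB_fixpoint (g : List (List Int)) :
    ∀ s : PySem.Set (Int × Int), ∀ q ∈ componentB g s, ∀ x, x ∈ nbrs4 q →
      pvOk g x = true → x ∈ componentB g s := by
  intro s
  induction s using componentB.induct g with
  | case1 s grown h =>
    intro q hq x hn hok
    rw [componentB, if_pos h] at hq ⊢
    obtain ⟨e, he, _⟩ := pv_growB_shape g s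
    have he0 : e = [] := by
      have := congrArg List.length he
      rw [List.length_append] at this
      rw [h] at this
      simpa using (List.length_eq_zero_iff).1 (by omega)
    have hgs : growB g s = s := by rw [he, he0, List.append_nil]
    have : x ∈ growB g s := (pv_mem_growB g s x).2 (Or.inr ⟨q, hq, hn, hok⟩)
    rwa [hgs] at this
  | case2 s grown h ih =>
    intro q hq x hn hok
    rw [componentB, if_neg h] at hq ⊢
    exact ih q hq x hn hok

theorem mem_componentB {g : List (List Int)} {p : Int × Int} (hok : pvOk g p = true)
    (x : Int × Int) : x ∈ componentB g (PySem.Set.ofList [p]) ↔ Conn g p x := by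
  constructor
  · refine fun hx => (componentB_inv g p _ (fun y hy => ?_) x hx).2
    have : y = p := by
      have := (PySem.Set.mem_ofList [p] y).1 hy
      simpa using this
    subst this
    exact ⟨hok, Relation.ReflTransGen.refl⟩
  · intro h
    induction h with
    | refl => exact componentB_supset g _ p ((PySem.Set.mem_ofList [p] p).2 (by simp))
    | @tail b c _ e ih => exact componentB_fixpoint g _ b ih c e.2.2 e.2.1

theorem pv_minval_eq {l₁ l₂ : List Int} (h : ∀ x, x ∈ l₁ ↔ x ∈ l₂) (hne : l₁ ≠ []) :
    (PySem.List.min? l₁ (fun x => x)).getD 0 = (PySem.List.min? l₂ (fun x => x)).getD 0 := by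
  have hne₂ : l₂ ≠ [] := by
    obtain ⟨a, ha⟩ := List.exists_mem_of_ne_nil l₁ hne
    exact List.ne_nil_of_mem ((h a).1 ha)
  rcases hm₁ : PySem.List.min? l₁ (fun x => x) with _ | m₁
  · exact absurd ((PySem.List.min?_eq_none_iff l₁ _).1 hm₁) hne
  rcases hm₂ : PySem.List.min? l₂ (fun x => x) with _ | m₂
  · exact absurd ((PySem.List.min?_eq_none_iff l₂ _).1 hm₂) hne₂
  have e₁ := PySem.List.min?_mem hm₁
  have e₂ := PySem.List.min?_mem hm₂
  have i₁ := PySem.List.min?_isMin hm₁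
  have i₂ := PySem.List.min?_isMin hm₂
  simp only [Option.getD_some]
  exact le_antisymm (i₁ m₂ ((h m₂).2 e₂)) (i₂ m₁ ((h m₁).1 e₁))

theorem pv_maxval_eq {l₁ l₂ : List Int} (h : ∀ x, x ∈ l₁ ↔ x ∈ l₂) (hne : l₁ ≠ []) :
    (PySem.List.max? l₁ (fun x => x)).getD 0 = (PySem.List.max? l₂ (fun x => x)).getD 0 := by
  have hne₂ : l₂ ≠ [] := by
    obtain ⟨a, ha⟩ := List.exists_mem_of_ne_nil l₁ hne
    exact List.ne_nil_of_mem ((h a).1 ha)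
  rcases hm₁ : PySem.List.max? l₁ (fun x => x) with _ | m₁
  · exact absurd ((PySem.List.max?_eq_none_iff l₁ _).1 hm₁) hne
  rcases hm₂ : PySem.List.max? l₂ (fun x => x) with _ | m₂
  · exact absurd ((PySem.List.max?_eq_none_iff l₂ _).1 hm₂) hne₂
  have e₁ := PySem.List.max?_mem hm₁
  have e₂ := PySem.List.max?_mem hm₂
  have i₁ := PySem.List.max?_isMax hm₁
  have i₂ := PySem.List.max?_isMax hm₂
  simp only [Option.getD_some]
  exact le_antisymm (i₂ m₁ ((h m₁).1 e₁)) (i₁ m₂ ((h m₂).2 e₂))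

theorem pv_bboxOf_eq {c₁ c₂ : List (Int × Int)} (h : ∀ x, x ∈ c₁ ↔ x ∈ c₂)
    (hne : c₁ ≠ []) : bboxOf c₁ = bboxOf c₂ := by
  have hf : ∀ v : Int, v ∈ c₁.map Prod.fst ↔ v ∈ c₂.map Prod.fst := by
    intro v
    simp only [List.mem_map]
    exact ⟨fun ⟨a, ha, hv⟩ => ⟨a, (h a).1 ha, hv⟩, fun ⟨a, ha, hv⟩ => ⟨a, (h a).2 ha, hv⟩⟩
  have hs : ∀ v : Int, v ∈ c₁.map Prod.snd ↔ v ∈ c₂.map Prod.snd := by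
    intro v
    simp only [List.mem_map]
    exact ⟨fun ⟨a, ha, hv⟩ => ⟨a, (h a).1 ha, hv⟩, fun ⟨a, ha, hv⟩ => ⟨a, (h a).2 ha, hv⟩⟩
  have hnf : c₁.map Prod.fst ≠ [] := by simpa using hne
  have hns : c₁.map Prod.snd ≠ [] := by simpa using hne
  unfold bboxOf
  rw [pv_minval_eq hf hnf, pv_maxval_eq hf hnf, pv_minval_eq hs hns, pv_maxval_eq hs hns]

def bboxC (g : List (List Int)) (p : Int × Int) : Int × Int × Int × Int :=
  bboxOf (componentB g (PySem.Set.ofList [p]))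

def Fv (g : List (List Int)) (p : Int × Int) : Int := colorOf p (bboxC g p)

theorem componentB_ne_nil {g : List (List Int)} {p : Int × Int} :
    componentB g (PySem.Set.ofList [p]) ≠ [] := by
  exact List.ne_nil_of_mem (componentB_supset g _ p ((PySem.Set.mem_ofList [p] p).2 (by simp)))

theorem bboxC_conn {g : List (List Int)} {p q : Int × Int} (hok : pvOk g p = true)
    (h : Conn g p q) : bboxC g p = bboxC g q := by
  have hokq : pvOk g q = true := Conn_ok h hok
  refine pv_bboxOf_eq (fun x => ?_) componentB_ne_nil
  rw [mem_componentB hok, mem_componentB hokq, Conn_class h]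



-- ===== matrix helpers =====

def entryN (m : List (List Int)) (i j : Nat) : Int := (m.getD i []).getD j 0

def ShapeEq (m g : List (List Int)) : Prop :=
  m.length = g.length ∧ ∀ i : Nat, (m.getD i []).length = (g.getD i []).length

def PtV (g : List (List Int)) (W : Finset (Int × Int)) (m : List (List Int)) : Prop :=
  ∀ i j : Nat, entryN m i j =
    if ((i : Int), (j : Int)) ∈ W then Fv g ((i : Int), (j : Int)) else entryN g i j

theorem pv_getD_set {α : Type} (m : List α) (k : Nat) (a : α) (i : Nat) (d : α) :
    (m.set k a).getD i d = if k = i ∧ k < m.length then a else m.getD i d := by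
  rw [List.getD_eq_getElem?_getD, List.getD_eq_getElem?_getD, List.getElem?_set]
  by_cases hk : k = i
  · subst hk
    by_cases hl : k < m.length
    · simp [hl]
    · rw [if_pos rfl, if_neg hl, if_neg (by tauto)]
      rw [List.getElem?_eq_none (by omega)]
  · simp [hk]

theorem pv_entry_bounds {g : List (List Int)} {i j : Nat} (h : entryN g i j = 5) :
    i < g.length ∧ j < (g.getD i []).length := by
  constructor
  · by_contra hh
    have hd := List.getD_eq_default g ([] : List Int) (n := i) (by omega)
    rw [entryN, hd] at h
    simp at h
  · by_contra hh
    have hd := List.getD_eq_default (g.getD i []) (0 : Int) (n := j) (by omega)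
    rw [entryN, hd] at h
    simp at h

theorem pv_cell_entry (g : List (List Int)) (q : Int × Int) :
    pvCell g q = entryN g q.1.toNat q.2.toNat := rfl

theorem setCell_len (m : List (List Int)) (p : Int × Int) (v : Int) :
    (setCell m p v).length = m.length := by simp [setCell]

theorem setCell_rowlen (m : List (List Int)) (p : Int × Int) (v : Int) (i : Nat) :
    ((setCell m p v).getD i []).length = (m.getD i []).length := by
  unfold setCell
  rw [pv_getD_set]
  split_ifs with h
  · rw [← h.1, List.length_set]
  · rfl

theorem setCell_entry (m : List (List Int)) (q : Int × Int) (v : Int)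
    (hi : q.1.toNat < m.length) (hj : q.2.toNat < (m.getD q.1.toNat []).length) (i j : Nat) :
    entryN (setCell m q v) i j =
      if q.1.toNat = i ∧ q.2.toNat = j then v else entryN m i j := by
  unfold setCell entryN
  rw [pv_getD_set]
  by_cases hk : q.1.toNat = i
  · subst hk
    rw [if_pos ⟨rfl, hi⟩, pv_getD_set]
    by_cases hj' : q.2.toNat = j
    · subst hj'
      rw [if_pos ⟨rfl, hj⟩, if_pos ⟨rfl, rfl⟩]
    · rw [if_neg (by tauto), if_neg (by tauto)]
  · rw [if_neg (by tauto), if_neg (by tauto)]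

theorem writes_inv (g : List (List Int)) (b : Int × Int × Int × Int) :
    ∀ (cells : List (Int × Int)) (out : List (List Int)) (W : Finset (Int × Int)),
      (∀ q ∈ cells, pvOk g q = true ∧ colorOf q b = Fv g q) →
      ShapeEq out g → PtV g W out →
      ShapeEq (cells.foldl (fun o q => setCell o q (colorOf q b)) out) g ∧
        PtV g (W ∪ cells.toFinset) (cells.foldl (fun o q => setCell o q (colorOf q b)) out) := by
  intro cells
  induction cells with
  | nil => intro out W _ hs hp; simpa using ⟨hs, hp⟩
  | cons q cells ih =>
    intro out W hc hs hp
    obtain ⟨hokq, hcol⟩ := hc q (by simp)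
    rw [pvOk_iff] at hokq
    obtain ⟨hq1, hq2, hq3, hq4, hq5⟩ := hokq
    have hb : q.1.toNat < g.length ∧ q.2.toNat < (g.getD q.1.toNat []).length :=
      pv_entry_bounds (by rw [← pv_cell_entry]; exact hq5)
    have hbi : q.1.toNat < out.length := by rw [hs.1]; exact hb.1
    have hbj : q.2.toNat < (out.getD q.1.toNat []).length := by rw [hs.2]; exact hb.2
    have hqc : q = ((q.1.toNat : Int), (q.2.toNat : Int)) := by
      rw [Prod.ext_iff]
      exact ⟨(Int.toNat_of_nonneg hq1).symm, (Int.toNat_of_nonneg hq3).symm⟩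
    have hs' : ShapeEq (setCell out q (colorOf q b)) g :=
      ⟨by rw [setCell_len]; exact hs.1, fun i => by rw [setCell_rowlen]; exact hs.2 i⟩
    have hp' : PtV g (insert q W) (setCell out q (colorOf q b)) := by
      intro i j
      rw [setCell_entry out q (colorOf q b) hbi hbj i j]
      by_cases he : q.1.toNat = i ∧ q.2.toNat = j
      · have hqij : ((i : Int), (j : Int)) = q := by rw [hqc, he.1, he.2]
        rw [if_pos he, if_pos (by rw [hqij]; exact Finset.mem_insert_self q W), hqij, ← hcol]
      · have hqij : ((i : Int), (j : Int)) ≠ q := by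
          intro hh
          rw [hqc] at hh
          simp only [Prod.mk.injEq, Nat.cast_inj] at hh
          exact he ⟨hh.1.symm, hh.2.symm⟩
        rw [if_neg he, hp i j]
        congr 1
        rw [eq_iff_iff]
        simp [Finset.mem_insert, hqij]
    have := ih (setCell out q (colorOf q b)) (insert q W)
      (fun x hx => hc x (List.mem_cons_of_mem q hx)) hs' hp'
    rw [List.foldl_cons]
    refine ⟨this.1, ?_⟩
    have hW : insert q W ∪ cells.toFinset = W ∪ (q :: cells).toFinset := by
      rw [List.toFinset_cons]
      rw [Finset.insert_union, Finset.union_insert]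
    rw [← hW]
    exact this.2

-- ===== A-side loop invariant =====

def inRangeP (g : List (List Int)) (p : Int × Int) : Prop :=
  0 ≤ p.1 ∧ p.1 < pvR g ∧ 0 ≤ p.2 ∧ p.2 < pvC g

def InvA (g : List (List Int)) (P : List (Int × Int))
    (st : Finset (Int × Int) × List (List Int)) : Prop :=
  ClosedV g st.1 ∧ ShapeEq st.2 g ∧ PtV g st.1 st.2 ∧
    (∀ p ∈ P, pvOk g p = true → p ∈ st.1)

theorem stepA_inv (g : List (List Int)) {P : List (Int × Int)}
    {st : Finset (Int × Int) × List (List Int)} {p : Int × Int}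
    (hp : inRangeP g p) (h : InvA g P st) : InvA g (P ++ [p]) (stepA g st p) := by
  obtain ⟨hV, hs, hpt, hproc⟩ := h
  by_cases hg : pvCell g p = 5 ∧ p ∉ st.1
  · have hok : pvOk g p = true := by
      rw [pvOk_iff]
      exact ⟨hp.1, hp.2.1, hp.2.2.1, hp.2.2.2, hg.1⟩
    obtain ⟨⟨l, h1, h2, h3⟩, h4⟩ := flood_spec g st.1 [p] []
    rw [List.nil_append] at h1
    have hRC := Rch_single_iff_Conn hV hok hg.2
    have hlm : ∀ x, x ∈ l ↔ Conn g p x := fun x => (h3 x).trans (hRC x)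
    have hcomp : ∀ x, x ∈ (floodAux g st.1 [p] []).1 ↔
        x ∈ componentB g (PySem.Set.ofList [p]) := by
      intro x
      rw [h1, hlm x, mem_componentB hok]
    have hpl : p ∈ l := (hlm p).2 Relation.ReflTransGen.refl
    have hlnil : (floodAux g st.1 [p] []).1 ≠ [] := by
      rw [h1]; exact List.ne_nil_of_mem hpl
    have hbb : bboxOf (floodAux g st.1 [p] []).1 = bboxC g p :=
      pv_bboxOf_eq hcomp hlnil
    have hc : ∀ q ∈ (floodAux g st.1 [p] []).1,
        pvOk g q = true ∧ colorOf q (bboxOf (floodAux g st.1 [p] []).1) = Fv g q := by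
      intro q hq
      rw [h1] at hq
      have hconn : Conn g p q := (hlm q).1 hq
      refine ⟨Conn_ok hconn hok, ?_⟩
      rw [hbb, bboxC_conn hok hconn]
      rfl
    obtain ⟨hs', hpt'⟩ := writes_inv g (bboxOf (floodAux g st.1 [p] []).1)
      (floodAux g st.1 [p] []).1 st.2 st.1 hc hs hpt
    have hV'mem : ∀ x, x ∈ (floodAux g st.1 [p] []).2 ↔ x ∈ st.1 ∨ Conn g p x :=
      fun x => (h4 x).trans (or_congr Iff.rfl (hRC x))
    have hunion : ∀ x, x ∈ (floodAux g st.1 [p] []).2 ↔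
        x ∈ st.1 ∪ (floodAux g st.1 [p] []).1.toFinset := by
      intro x
      rw [hV'mem x, Finset.mem_union, List.mem_toFinset, h1, hlm x]
    have hstep : stepA g st p =
        ((floodAux g st.1 [p] []).2,
          (floodAux g st.1 [p] []).1.foldl
            (fun o q => setCell o q (colorOf q (bboxOf (floodAux g st.1 [p] []).1))) st.2) := by
      rw [stepA, if_pos hg]
    rw [hstep]
    refine ⟨?_, hs', ?_, ?_⟩
    · intro x hx
      rcases (hV'mem x).1 hx with hx' | hx'
      · exact ⟨(hV _ hx').1, fun q hq => (hV'mem q).2 (Or.inl ((hV _ hx').2 q hq))⟩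
      · refine ⟨Conn_ok hx' hok, fun q hq => (hV'mem q).2 (Or.inr ?_)⟩
        exact Relation.ReflTransGen.tail hx' hq
    · intro i j
      rw [hpt' i j]
      congr 1
      rw [eq_iff_iff]
      exact (hunion _).symm
    · intro x hx hokx
      rcases List.mem_append.1 hx with hx | hx
      · exact (hV'mem x).2 (Or.inl (hproc x hx hokx))
      · have : x = p := by simpa using hx
        subst this
        exact (hV'mem x).2 (Or.inr Relation.ReflTransGen.refl)
  · have hst : stepA g st p = st := by rw [stepA, if_neg hg]
    rw [hst]
    refine ⟨hV, hs, hpt, fun x hx hokx => ?_⟩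
    rcases List.mem_append.1 hx with hx | hx
    · exact hproc x hx hokx
    · have : x = p := by simpa using hx
      subst this
      by_cases hv : x ∈ st.1
      · exact hv
      · exfalso
        exact hg ⟨((pvOk_iff g x).1 hokx).2.2.2.2, hv⟩

theorem foldA_inv (g : List (List Int)) :
    ∀ (Q P : List (Int × Int)) (st : Finset (Int × Int) × List (List Int)),
      (∀ p ∈ Q, inRangeP g p) → InvA g P st →
      InvA g (P ++ Q) (Q.foldl (stepA g) st) := by
  intro Q
  induction Q with
  | nil => intro P st _ h; simpa using h
  | cons q Q ih =>
    intro P st hq h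
    rw [List.foldl_cons, List.append_cons]
    exact ih (P ++ [q]) (stepA g st q) (fun x hx => hq x (List.mem_cons_of_mem q hx))
      (stepA_inv g (hq q (by simp)) h)

theorem mem_scanPos (g : List (List Int)) (p : Int × Int) :
    p ∈ scanPos g ↔ ∃ i j : Nat, i < g.length ∧ j < (g.headD []).length ∧
      p = ((i : Int), (j : Int)) := by
  unfold scanPos
  rw [List.mem_flatMap]
  constructor
  · rintro ⟨r, hr, hp⟩
    rw [List.mem_map] at hp
    obtain ⟨c, hc, rfl⟩ := hp
    exact ⟨r, c, List.mem_range.1 hr, List.mem_range.1 hc, rfl⟩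
  · rintro ⟨i, j, hi, hj, rfl⟩
    exact ⟨i, List.mem_range.2 hi, List.mem_map.2 ⟨j, List.mem_range.2 hj, rfl⟩⟩

def rowT (g : List (List Int)) (r : Int) : List Int :=
  (List.range (g.getD r.toNat []).length).map
    (fun (j : Nat) => if pvOk g (r, (j : Int)) = true then Fv g (r, (j : Int))
      else (g.getD r.toNat []).getD j 0)

def outT (g : List (List Int)) : List (List Int) :=
  (List.range g.length).map (fun (i : Nat) => rowT g (i : Int))

theorem A_eq_outT (g : List (List Int)) : solve_b6afb2da g = outT g := by
  have hinit : InvA g [] (∅, g.map (fun row => row)) := by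
    refine ⟨fun x hx => absurd hx (Finset.notMem_empty x), ?_, ?_, by simp⟩
    · rw [List.map_id']
      exact ⟨rfl, fun _ => rfl⟩
    · intro i j
      rw [List.map_id', if_neg (Finset.notMem_empty _)]
  have hrange : ∀ p ∈ scanPos g, inRangeP g p := by
    intro p hp
    obtain ⟨i, j, hi, hj, rfl⟩ := (mem_scanPos g p).1 hp
    refine ⟨by show (0:Int) ≤ (i:Int); positivity, ?_, by show (0:Int) ≤ (j:Int); positivity, ?_⟩
    · show (i : Int) < (g.length : Int)
      exact_mod_cast hi
    · show (j : Int) < ((g.headD []).length : Int)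
      exact_mod_cast hj
  have hfin := foldA_inv g (scanPos g) [] (∅, g.map (fun row => row)) hrange hinit
  rw [List.nil_append] at hfin
  obtain ⟨hV, hs, hpt, hproc⟩ := hfin
  set res := (scanPos g).foldl (stepA g) (∅, g.map (fun row => row)) with hres
  have hVok : ∀ x, x ∈ res.1 ↔ pvOk g x = true := by
    intro x
    refine ⟨fun hx => (hV x hx).1, fun hx => ?_⟩
    refine hproc x ?_ hx
    rw [pvOk_iff] at hx
    rw [mem_scanPos]
    refine ⟨x.1.toNat, x.2.toNat, ?_, ?_, ?_⟩
    · simp only [pvR] at hx; omega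
    · simp only [pvC, pvR] at hx; omega
    · rw [Prod.ext_iff]
      exact ⟨(Int.toNat_of_nonneg hx.1).symm, (Int.toNat_of_nonneg hx.2.2.1).symm⟩
  show res.2 = outT g
  apply List.ext_getElem
  · rw [hs.1, outT, List.length_map, List.length_range]
  · intro i hi hi2
    have hig : i < g.length := by rwa [hs.1] at hi
    have hrowlen : res.2[i].length = (g.getD i []).length := by
      rw [← List.getD_eq_getElem res.2 [] hi]
      exact hs.2 i
    have houtT : (outT g)[i] = rowT g (i : Int) := by
      simp [outT]
    rw [houtT]
    apply List.ext_getElem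
    · rw [hrowlen, rowT, List.length_map, List.length_range]
      simp
    · intro j hj hj2
      have hjg : j < (g.getD i []).length := by rwa [hrowlen] at hj
      have hleft : res.2[i][j] = entryN res.2 i j := by
        rw [entryN, List.getD_eq_getElem res.2 [] hi,
          List.getD_eq_getElem _ 0 (by rwa [hrowlen] at hj ⊢)]
      have hright : (rowT g (i : Int))[j] =
          if pvOk g ((i : Int), (j : Int)) = true then Fv g ((i : Int), (j : Int))
          else (g.getD i []).getD j 0 := by
        simp only [rowT, List.getElem_map, List.getElem_range, Int.toNat_natCast]
      rw [hleft, hright, hpt i j]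
      by_cases hok : pvOk g ((i : Int), (j : Int)) = true
      · rw [if_pos ((hVok _).2 hok), if_pos hok]
      · rw [if_neg (fun hmem => hok ((hVok _).1 hmem)), if_neg hok]
        rfl



-- ===== B-side loop invariant =====

theorem pv_get?_foldl_insert_not_mem (l : List (Int × Int))
    (d : PySem.Dict (Int × Int) (Int × Int × Int × Int)) (b : Int × Int × Int × Int)
    {q : Int × Int} (hq : q ∉ l) :
    (l.foldl (fun d x => d.insert x b) d).get? q = d.get? q := by
  induction l generalizing d with
  | nil => rfl
  | cons a t ih =>
    rw [List.foldl_cons, ih _ (fun h => hq (List.mem_cons_of_mem a h)),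
      PySem.Dict.get?_insert, if_neg (fun h => hq (by simp [h]))]

theorem pv_get?_foldl_insert_mem (l : List (Int × Int))
    (d : PySem.Dict (Int × Int) (Int × Int × Int × Int)) (b : Int × Int × Int × Int)
    {q : Int × Int} (hq : q ∈ l) :
    (l.foldl (fun d x => d.insert x b) d).get? q = some b := by
  induction l generalizing d with
  | nil => simp at hq
  | cons a t ih =>
    rw [List.foldl_cons]
    by_cases hqt : q ∈ t
    · exact ih _ hqt
    · have hqa : q = a := by
        rcases List.mem_cons.1 hq with h | h
        · exact h
        · exact absurd h hqt
      subst hqa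
      rw [pv_get?_foldl_insert_not_mem t _ b hqt, PySem.Dict.get?_insert_self]

def CI (g : List (List Int)) (d : PySem.Dict (Int × Int) (Int × Int × Int × Int)) : Prop :=
  ∀ q bb, d.get? q = some bb → bb = bboxC g q

theorem CI_foldl (g : List (List Int)) (l : List (Int × Int)) (b : Int × Int × Int × Int)
    (d : PySem.Dict (Int × Int) (Int × Int × Int × Int))
    (hall : ∀ q ∈ l, b = bboxC g q) (hd : CI g d) :
    CI g (l.foldl (fun d x => d.insert x b) d) := by
  intro q bb hq
  by_cases hql : q ∈ l
  · rw [pv_get?_foldl_insert_mem l d b hql] at hq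
    cases hq
    exact hall q hql
  · rw [pv_get?_foldl_insert_not_mem l d b hql] at hq
    exact hd q bb hq

theorem stepBc_spec (g : List (List Int)) (r c : Int)
    (st : PySem.Dict (Int × Int) (Int × Int × Int × Int) × List Int)
    (hr1 : 0 ≤ r) (hr2 : r < pvR g) (hc1 : 0 ≤ c) (hc2 : c < pvC g)
    (hd : CI g st.1) (hlen : st.2.length = (g.getD r.toNat []).length) :
    CI g (stepBc g r st c).1 ∧ (stepBc g r st c).2.length = st.2.length ∧
      ∀ j : Nat, (stepBc g r st c).2.getD j 0 =
        if (j : Int) = c ∧ pvOk g (r, c) = true then Fv g (r, c) else st.2.getD j 0 := by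
  by_cases h5 : pvCell g (r, c) = 5
  case neg =>
    have hst : stepBc g r st c = st := by rw [stepBc, if_neg h5]
    rw [hst]
    refine ⟨hd, rfl, fun j => ?_⟩
    rw [if_neg]
    rintro ⟨-, hok⟩
    rw [pvOk_iff] at hok
    exact h5 hok.2.2.2.2
  case pos =>
    have hok : pvOk g (r, c) = true := by
      rw [pvOk_iff]
      exact ⟨hr1, hr2, hc1, hc2, h5⟩
    have hstep : stepBc g r st c =
        (if (st.1.get? (r, c)).isNone then
            (componentB g (PySem.Set.ofList [(r, c)])).foldl
              (fun d q => d.insert q (bboxOf (componentB g (PySem.Set.ofList [(r, c)])))) st.1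
          else st.1,
         st.2.set c.toNat (colorOf (r, c)
          (((if (st.1.get? (r, c)).isNone then
            (componentB g (PySem.Set.ofList [(r, c)])).foldl
              (fun d q => d.insert q (bboxOf (componentB g (PySem.Set.ofList [(r, c)])))) st.1
          else st.1).get? (r, c)).getD (0, 0, 0, 0)))) := by
      rw [stepBc]
      rw [if_pos h5]
    have hCI : CI g (if (st.1.get? (r, c)).isNone then
        (componentB g (PySem.Set.ofList [(r, c)])).foldl
          (fun d q => d.insert q (bboxOf (componentB g (PySem.Set.ofList [(r, c)])))) st.1
      else st.1) := by
      split_ifs with hmiss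
      · refine CI_foldl g _ _ _ (fun q hq => ?_) hd
        have hconn : Conn g (r, c) q := (mem_componentB hok q).1 hq
        rw [← bboxC_conn hok hconn]
        rfl
      · exact hd
    have hget : (((if (st.1.get? (r, c)).isNone then
        (componentB g (PySem.Set.ofList [(r, c)])).foldl
          (fun d q => d.insert q (bboxOf (componentB g (PySem.Set.ofList [(r, c)])))) st.1
      else st.1).get? (r, c)).getD (0, 0, 0, 0)) = bboxC g (r, c) := by
      split_ifs with hmiss
      · rw [pv_get?_foldl_insert_mem _ _ _ (componentB_supset g _ (r, c)
          ((PySem.Set.mem_ofList [(r, c)] (r, c)).2 (by simp)))]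
        rfl
      · rcases hbv : st.1.get? (r, c) with _ | bv
        · rw [hbv] at hmiss
          simp at hmiss
        · exact hd (r, c) bv hbv
    rw [hstep]
    refine ⟨hCI, by simp, fun j => ?_⟩
    rw [hget]
    have h55 : entryN g r.toNat c.toNat = 5 := h5
    have hjc : c.toNat < st.2.length := by
      rw [hlen]
      exact (pv_entry_bounds h55).2
    rw [pv_getD_set]
    by_cases hj : c.toNat = j
    · rw [if_pos ⟨hj, hjc⟩, if_pos ⟨by rw [← hj, Int.toNat_of_nonneg hc1], hok⟩]
      rfl
    · rw [if_neg (by tauto), if_neg ?_]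
      rintro ⟨hjj, -⟩
      exact hj (by omega)

theorem foldBc_spec (g : List (List Int)) (r : Int) (hr1 : 0 ≤ r) (hr2 : r < pvR g) :
    ∀ (cs : List Int) (d : PySem.Dict (Int × Int) (Int × Int × Int × Int)) (row : List Int),
      (∀ c ∈ cs, 0 ≤ c ∧ c < pvC g) → CI g d → row.length = (g.getD r.toNat []).length →
      CI g ((cs.foldl (stepBc g r) (d, row)).1) ∧
        (cs.foldl (stepBc g r) (d, row)).2.length = row.length ∧
        ∀ j : Nat, (cs.foldl (stepBc g r) (d, row)).2.getD j 0 =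
          if (j : Int) ∈ cs ∧ pvOk g (r, (j : Int)) = true then Fv g (r, (j : Int))
          else row.getD j 0 := by
  intro cs
  induction cs with
  | nil =>
    intro d row _ hd _
    exact ⟨hd, rfl, fun j => by simp⟩
  | cons c cs ih =>
    intro d row hcs hd hlen
    obtain ⟨hc1, hc2⟩ := hcs c (by simp)
    obtain ⟨hd1, hl1, hp1⟩ := stepBc_spec g r c (d, row) hr1 hr2 hc1 hc2 hd hlen
    rw [List.foldl_cons]
    obtain ⟨hd2, hl2, hp2⟩ := ih (stepBc g r (d, row) c).1 (stepBc g r (d, row) c).2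
      (fun x hx => hcs x (List.mem_cons_of_mem c hx)) hd1 (by rw [hl1, hlen])
    refine ⟨hd2, by rw [hl2, hl1], fun j => ?_⟩
    rw [hp2 j, hp1 j]
    by_cases hjc : (j : Int) = c
    · subst hjc
      by_cases hok : pvOk g (r, (j : Int)) = true
      · by_cases hmem : (j : Int) ∈ cs
        · rw [if_pos ⟨hmem, hok⟩, if_pos ⟨List.mem_cons_self, hok⟩]
        · rw [if_neg (by tauto), if_pos ⟨rfl, hok⟩, if_pos ⟨List.mem_cons_self, hok⟩]
      · rw [if_neg (by tauto), if_neg (by tauto), if_neg (by tauto)]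
    · by_cases hmem : (j : Int) ∈ cs
      · by_cases hok : pvOk g (r, (j : Int)) = true
        · rw [if_pos ⟨hmem, hok⟩, if_pos ⟨List.mem_cons_of_mem c hmem, hok⟩]
        · rw [if_neg (by tauto), if_neg (by tauto), if_neg (by tauto)]
      · rw [if_neg (by tauto), if_neg (by tauto), if_neg ?_]
        rintro ⟨hm, hok⟩
        rcases List.mem_cons.1 hm with h | h
        · exact hjc h
        · exact hmem h

theorem foldBr_spec (g : List (List Int)) :
    ∀ (rs : List Int) (d : PySem.Dict (Int × Int) (Int × Int × Int × Int))
      (acc : List (List Int)),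
      (∀ r ∈ rs, 0 ≤ r ∧ r < pvR g) → CI g d →
      (rs.foldl (stepBr g) (d, acc)).2 = acc ++ rs.map (fun r => rowT g r) := by
  intro rs
  induction rs with
  | nil =>
    intro d acc _ _
    simp
  | cons r rs ih =>
    intro d acc hrs hd
    obtain ⟨hr1, hr2⟩ := hrs r (by simp)
    have hcs : ∀ c ∈ (List.range (g.headD []).length).map (fun (c : Nat) => (c : Int)),
        0 ≤ c ∧ c < pvC g := by
      intro c hc
      rw [List.mem_map] at hc
      obtain ⟨n, hn, rfl⟩ := hc
      refine ⟨by positivity, ?_⟩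
      show (n : Int) < ((g.headD []).length : Int)
      exact_mod_cast List.mem_range.1 hn
    obtain ⟨hd1, hl1, hp1⟩ := foldBc_spec g r hr1 hr2
      ((List.range (g.headD []).length).map (fun (c : Nat) => (c : Int))) d (g.getD r.toNat [])
      hcs hd rfl
    have hrow : (((List.range (g.headD []).length).map (fun (c : Nat) => (c : Int))).foldl
        (stepBc g r) (d, g.getD r.toNat [])).2 = rowT g r := by
      apply List.ext_getElem
      · rw [hl1, rowT, List.length_map, List.length_range]
      · intro j hj hj2
        have hjlen : j < (g.getD r.toNat []).length := by rwa [hl1] at hj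
        rw [← List.getD_eq_getElem _ 0 hj, hp1 j]
        have hright : (rowT g r)[j] = if pvOk g (r, (j : Int)) = true
            then Fv g (r, (j : Int)) else (g.getD r.toNat []).getD j 0 := by
          simp only [rowT, List.getElem_map, List.getElem_range]
        rw [hright]
        by_cases hok : pvOk g (r, (j : Int)) = true
        · have hmem : (j : Int) ∈ (List.range (g.headD []).length).map
              (fun (c : Nat) => (c : Int)) := by
            rw [List.mem_map]
            refine ⟨j, List.mem_range.2 ?_, rfl⟩
            have := ((pvOk_iff g (r, (j : Int))).1 hok).2.2.2.1
            simp only [pvC] at this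
            exact_mod_cast this
          rw [if_pos ⟨hmem, hok⟩, if_pos hok]
        · rw [if_neg (by tauto), if_neg hok]
    have hstep : stepBr g (d, acc) r =
        ((((List.range (g.headD []).length).map (fun (c : Nat) => (c : Int))).foldl
            (stepBc g r) (d, g.getD r.toNat [])).1,
         acc ++ [(((List.range (g.headD []).length).map (fun (c : Nat) => (c : Int))).foldl
            (stepBc g r) (d, g.getD r.toNat [])).2]) := by
      rw [stepBr]
    rw [List.foldl_cons, hstep, hrow,
      ih _ (acc ++ [rowT g r]) (fun x hx => hrs x (List.mem_cons_of_mem r hx)) hd1]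
    simp

theorem B_eq_outT (g : List (List Int)) : solve_b6afb2da_alt g = outT g := by
  unfold solve_b6afb2da_alt
  have hbounds : ∀ r ∈ (List.range g.length).map (fun (r : Nat) => (r : Int)),
      0 ≤ r ∧ r < pvR g := by
    intro r hr
    rw [List.mem_map] at hr
    obtain ⟨n, hn, rfl⟩ := hr
    refine ⟨by positivity, ?_⟩
    show (n : Int) < (g.length : Int)
    exact_mod_cast List.mem_range.1 hn
  have hci : CI g PySem.Dict.empty := by
    intro q bb h
    cases (show (none : Option (Int × Int × Int × Int)) = some bb from h)
  rw [foldBr_spec g _ PySem.Dict.empty [] hbounds hci, List.nil_append, List.map_map]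
  rfl

-- ===== VERDICT (by name: the statement is the Claim_ definition above) =====
theorem solve_b6afb2da_spec : Claim_equal_solve_b6afb2da := by
  intro grid _ _
  unfold Spec_solve_b6afb2da
  rw [A_eq_outT, B_eq_outT]
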